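-- pv_equiv track=rewrite | github.com/Sylphar/MonikA.I | Monika_datasets/Monika-filtering-plain-text.py | get_emotion
-- ===== SOURCE A (Python) =====
-- def get_emotion(sprite_code):
--     """Extract emotion from sprite code following the order: eyes, eyebrows, blush, tears, mouth.
--     Returns unique emotion tags."""
--     if not sprite_code:
--         return ""
--
--     emotions = set()  # Using a set to avoid duplicates
--
--     # Define emotion mappings by category
--     # TO DO : create combinaisons lists, like happy+worried = Awkward
--     # Remove [neutral] from expressions if it isn't the only emotion
--     # Establish ranking of importance : combinaisons with state > State > combinaison > eyes > eyebrows > mouth. ONLY KEEP ONE EMOTIONAL TAG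
--     EMOTIONS = {
--         'eyes': {
--             'e': '[neutral]',
--             'w': '[surprised]',
--             's': '[excited]',
--             't': '[smug]',
--             'c': '[crazed]',
--             'h': '[happy]',
--             'r': '[pensive]',
--             'l': '[pensive]',
--             'd': '[sad]',
--             'k': '[playful]',
--             'n': '[playful]',
--             'f': '[gentle]',
--             'm': '[smug]',
--             'g': '[smug]'
--         },
--         'eyebrows': {
--             'f': '[intense]',
--             'u': '[interested]',
--             'k': '[worried]',
--             't': '[thoughtful]'
--         },
--         'states': {
--             'bl': '[blushing]',
--             'bs': '[blushing]',
--             'bf': '[intense blushing]',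
--             'ts': '[crying]',
--             'td': '[dried tears]',
--             'tp': '[holding back tears]',
--             'tu': '[crying]'
--         },
--         'mouth': {
--             'a': '[happy]',
--             'b': '[cheerful]',
--             'c': '[neutral]',
--             'd': '[interested]',
--             'o': '[surprised]',
--             'u': '[smug]',
--             'w': '[excited]',
--             'x': '[angry]',
--             'p': '[pouty]',
--             't': '[playful]',
--             'g': '[disgusted]'
--         }
--     }
--
--     # Process in order: eyes, eyebrows, states, mouth
--     if len(sprite_code) > 0 and sprite_code[0] in EMOTIONS['eyes']:
--         emotions.add(EMOTIONS['eyes'][sprite_code[0]])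
--
--     if len(sprite_code) > 1 and sprite_code[1] in EMOTIONS['eyebrows']:
--         emotions.add(EMOTIONS['eyebrows'][sprite_code[1]])
--
--     # Check for two-character states
--     for state in EMOTIONS['states']:
--         if state in sprite_code:
--             emotions.add(EMOTIONS['states'][state])
--
--     if len(sprite_code) > 0 and sprite_code[-1] in EMOTIONS['mouth']:
--         emotions.add(EMOTIONS['mouth'][sprite_code[-1]])
--
--     return ' '.join(sorted(emotions))
-- ===== SOURCE B (Python) =====
-- # Collect option-valued lookups in one list (eyes, mouth, eyebrows, and a single
-- # windowed scan over adjacent character pairs for the two-char states), then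
-- # dedupe+sort once, instead of A's seven full-string substring scans.
-- _EYES = {
--     'e': '[neutral]', 'w': '[surprised]', 's': '[excited]', 't': '[smug]',
--     'c': '[crazed]', 'h': '[happy]', 'r': '[pensive]', 'l': '[pensive]',
--     'd': '[sad]', 'k': '[playful]', 'n': '[playful]', 'f': '[gentle]',
--     'm': '[smug]', 'g': '[smug]',
-- }
-- _EYEBROWS = {
--     'f': '[intense]', 'u': '[interested]', 'k': '[worried]', 't': '[thoughtful]',
-- }
-- _STATES = {
--     ('b', 'l'): '[blushing]', ('b', 's'): '[blushing]',
--     ('b', 'f'): '[intense blushing]', ('t', 's'): '[crying]',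
--     ('t', 'd'): '[dried tears]', ('t', 'p'): '[holding back tears]',
--     ('t', 'u'): '[crying]',
-- }
-- _MOUTH = {
--     'a': '[happy]', 'b': '[cheerful]', 'c': '[neutral]', 'd': '[interested]',
--     'o': '[surprised]', 'u': '[smug]', 'w': '[excited]', 'x': '[angry]',
--     'p': '[pouty]', 't': '[playful]', 'g': '[disgusted]',
-- }
--
--
-- def get_emotion(sprite_code):
--     """Extract emotion from sprite code. Returns unique emotion tags."""
--     if not sprite_code:
--         return ""
--     tags = [_EYES.get(sprite_code[0]), _MOUTH.get(sprite_code[-1])]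
--     if len(sprite_code) > 1:
--         tags.append(_EYEBROWS.get(sprite_code[1]))
--     tags.extend(_STATES.get(p) for p in zip(sprite_code, sprite_code[1:]))
--     return ' '.join(sorted({t for t in tags if t is not None}))
-- ===== Notes on version B (the rewrite author's own statement) =====
-- stated objective: idiomatic
-- what changed: Replaces the seven per-state substring scans and the incremental set mutation with a single windowed pass over adjacent character pairs looked up in a pair-keyed table, collecting all option-valued lookups into one list that is deduped and sorted once.
import Mathlib
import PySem

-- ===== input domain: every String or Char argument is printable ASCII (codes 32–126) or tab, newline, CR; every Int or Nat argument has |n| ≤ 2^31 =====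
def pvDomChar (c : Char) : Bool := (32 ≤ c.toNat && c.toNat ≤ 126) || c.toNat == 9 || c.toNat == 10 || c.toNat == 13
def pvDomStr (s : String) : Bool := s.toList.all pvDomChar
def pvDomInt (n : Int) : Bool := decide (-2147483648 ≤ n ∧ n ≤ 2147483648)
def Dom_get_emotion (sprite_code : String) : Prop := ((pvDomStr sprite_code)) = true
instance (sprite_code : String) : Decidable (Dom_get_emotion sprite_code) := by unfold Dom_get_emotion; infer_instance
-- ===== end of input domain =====

-- B replaces A's seven per-state substring scans and incremental set mutation by one
-- windowed pass over adjacent character pairs plus a collect-then-dedupe-sort finish (idiomatic; same output).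

-- Constant lookup tables shared by both Pythons (identical literals in Source A and Source B)
def eyesT : PySem.Dict Char String :=
  ⟨[('e', "[neutral]"), ('w', "[surprised]"), ('s', "[excited]"), ('t', "[smug]"),
    ('c', "[crazed]"), ('h', "[happy]"), ('r', "[pensive]"), ('l', "[pensive]"),
    ('d', "[sad]"), ('k', "[playful]"), ('n', "[playful]"), ('f', "[gentle]"),
    ('m', "[smug]"), ('g', "[smug]")]⟩
def browsT : PySem.Dict Char String :=
  ⟨[('f', "[intense]"), ('u', "[interested]"), ('k', "[worried]"), ('t', "[thoughtful]")]⟩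
def mouthT : PySem.Dict Char String :=
  ⟨[('a', "[happy]"), ('b', "[cheerful]"), ('c', "[neutral]"), ('d', "[interested]"),
    ('o', "[surprised]"), ('u', "[smug]"), ('w', "[excited]"), ('x', "[angry]"),
    ('p', "[pouty]"), ('t', "[playful]"), ('g', "[disgusted]")]⟩

-- ===== PORT A =====
-- A's EMOTIONS['states']: two-character string keys, iterated in insertion order
def aStates : PySem.Dict String String :=
  ⟨[("bl", "[blushing]"), ("bs", "[blushing]"), ("bf", "[intense blushing]"),
    ("ts", "[crying]"), ("td", "[dried tears]"), ("tp", "[holding back tears]"),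
    ("tu", "[crying]")]⟩

-- 'if k in d: emotions.add(d[k])' — d[k] never raises under the membership guard
def addIfSome (em : PySem.Set String) (o : Option String) : PySem.Set String :=
  match o with
  | some v => PySem.Set.add em v
  | none => em

def get_emotion (sprite_code : String) : String :=
  if sprite_code.toList = [] then ""
  else
    let emotions : PySem.Set String := PySem.Set.empty
    -- if len(sprite_code) > 0 and sprite_code[0] in eyes: emotions.add(eyes[sprite_code[0]])
    let emotions := addIfSome emotions ((PySem.Str.pyGet? sprite_code 0).bind (PySem.Dict.get? eyesT))
    -- if len(sprite_code) > 1 and sprite_code[1] in eyebrows: emotions.add(eyebrows[sprite_code[1]])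
    let emotions := addIfSome emotions ((PySem.Str.pyGet? sprite_code 1).bind (PySem.Dict.get? browsT))
    -- for state in states: if state in sprite_code: emotions.add(states[state])
    let emotions := aStates.items.foldl
      (fun em kv => if PySem.Str.isIn kv.1 sprite_code then PySem.Set.add em kv.2 else em)
      emotions
    -- if sprite_code[-1] in mouth: emotions.add(mouth[sprite_code[-1]])
    let emotions := addIfSome emotions ((PySem.Str.pyGet? sprite_code (-1)).bind (PySem.Dict.get? mouthT))
    PySem.Str.join " " (PySem.List.sorted emotions (fun x => x))

-- ===== PORT B =====
-- B's _STATES: keyed by the pair of adjacent characters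
def bStates : PySem.Dict (Char × Char) String :=
  ⟨[(('b', 'l'), "[blushing]"), (('b', 's'), "[blushing]"), (('b', 'f'), "[intense blushing]"),
    (('t', 's'), "[crying]"), (('t', 'd'), "[dried tears]"), (('t', 'p'), "[holding back tears]"),
    (('t', 'u'), "[crying]")]⟩

def get_emotion_alt (sprite_code : String) : String :=
  if sprite_code.toList = [] then ""
  else
    let l := sprite_code.toList
    let tags : List (Option String) :=
      [(PySem.Str.pyGet? sprite_code 0).bind (PySem.Dict.get? eyesT),
       (PySem.Str.pyGet? sprite_code (-1)).bind (PySem.Dict.get? mouthT)]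
    let tags := if 1 < l.length
      then tags ++ [(PySem.Str.pyGet? sprite_code 1).bind (PySem.Dict.get? browsT)]
      else tags
    -- one windowed scan: zip(sprite_code, sprite_code[1:]) looked up in the pair table
    let tags := tags ++ (l.zip l.tail).map (PySem.Dict.get? bStates)
    PySem.Str.join " " (PySem.List.sorted (PySem.Set.ofList (tags.filterMap id)) (fun x => x))

-- ===== PRECONDITION & SPEC =====
def Spec_get_emotion (sprite_code : String) (out : String) : Prop := out = get_emotion_alt sprite_code
instance (sprite_code : String) (out : String) : Decidable (Spec_get_emotion sprite_code out) := by unfold Spec_get_emotion; infer_instance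

-- ===== CLAIM (what is proved, stated in full; the proofs are below) =====
def Claim_equal_get_emotion : Prop := ∀ (sprite_code : String), Dom_get_emotion sprite_code → Spec_get_emotion sprite_code (get_emotion sprite_code)

-- ===== LEMMAS AND PROOFS =====

lemma mem_addIfSome (em : PySem.Set String) (o : Option String) (x : String) :
    x ∈ addIfSome em o ↔ x ∈ em ∨ o = some x := by
  cases o <;> simp [addIfSome, PySem.Set.mem_add, eq_comm]

lemma nodup_addIfSome (em : PySem.Set String) (o : Option String) (h : em.Nodup) :
    (addIfSome em o).Nodup := by
  cases o with
  | none => exact h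
  | some v => exact PySem.Set.nodup_add em v h

lemma mem_addIfP (em : PySem.Set String) (v x : String) (c : Prop) [inst : Decidable c] :
    x ∈ (if c then PySem.Set.add em v else em) ↔ x ∈ em ∨ (c ∧ x = v) := by
  split_ifs <;> simp_all [PySem.Set.mem_add]

lemma nodup_addIf (em : PySem.Set String) (v : String) (c : Bool) (h : em.Nodup) :
    (if c then PySem.Set.add em v else em).Nodup := by
  split_ifs
  · exact PySem.Set.nodup_add em v h
  · exact h

lemma pair_mem_zip_iff_infix (a b : Char) (l : List Char) :
    (a, b) ∈ l.zip l.tail ↔ [a, b] <:+: l := by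
  induction l with
  | nil => simp
  | cons c l ih =>
    cases l with
    | nil => simp [List.infix_cons_iff]
    | cons d r =>
      simp only [List.tail_cons] at ih ⊢
      simp only [List.zip_cons_cons, List.mem_cons, ih, List.infix_cons_iff,
        List.cons_prefix_cons, Prod.mk.injEq]
      constructor
      · rintro (⟨rfl, rfl⟩ | h)
        · exact Or.inl ⟨rfl, rfl, List.nil_prefix⟩
        · exact Or.inr h
      · rintro (⟨rfl, rfl, -⟩ | h)
        · exact Or.inl ⟨rfl, rfl⟩
        · exact Or.inr h

lemma bStates_get (p : Char × Char) (x : String) :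
    PySem.Dict.get? bStates p = some x ↔
      (p = ('b', 'l') ∧ x = "[blushing]") ∨ (p = ('b', 's') ∧ x = "[blushing]") ∨
      (p = ('b', 'f') ∧ x = "[intense blushing]") ∨ (p = ('t', 's') ∧ x = "[crying]") ∨
      (p = ('t', 'd') ∧ x = "[dried tears]") ∨ (p = ('t', 'p') ∧ x = "[holding back tears]") ∨
      (p = ('t', 'u') ∧ x = "[crying]") := by
  simp only [bStates, PySem.Dict.get?, List.find?]
  repeat' split
  all_goals simp_all [beq_iff_eq, beq_eq_false_iff_ne]
  all_goals (first | (subst p; simp_all) | simp_all [eq_comm (a := p)])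
  all_goals exact eq_comm

-- the tags the two-character states contribute for input s
def StatesD (s : String) (x : String) : Prop :=
  (('b', 'l') ∈ s.toList.zip s.toList.tail ∧ x = "[blushing]") ∨
  (('b', 's') ∈ s.toList.zip s.toList.tail ∧ x = "[blushing]") ∨
  (('b', 'f') ∈ s.toList.zip s.toList.tail ∧ x = "[intense blushing]") ∨
  (('t', 's') ∈ s.toList.zip s.toList.tail ∧ x = "[crying]") ∨
  (('t', 'd') ∈ s.toList.zip s.toList.tail ∧ x = "[dried tears]") ∨
  (('t', 'p') ∈ s.toList.zip s.toList.tail ∧ x = "[holding back tears]") ∨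
  (('t', 'u') ∈ s.toList.zip s.toList.tail ∧ x = "[crying]")

lemma states_equiv (s : String) (x : String) :
    (∃ p ∈ s.toList.zip s.toList.tail, PySem.Dict.get? bStates p = some x) ↔ StatesD s x := by
  constructor
  · rintro ⟨p, hp, hl⟩
    rw [bStates_get] at hl
    unfold StatesD
    rcases hl with ⟨rfl, rfl⟩ | ⟨rfl, rfl⟩ | ⟨rfl, rfl⟩ | ⟨rfl, rfl⟩ | ⟨rfl, rfl⟩ | ⟨rfl, rfl⟩ | ⟨rfl, rfl⟩ <;>
      tauto
  · unfold StatesD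
    rintro (⟨h, rfl⟩ | ⟨h, rfl⟩ | ⟨h, rfl⟩ | ⟨h, rfl⟩ | ⟨h, rfl⟩ | ⟨h, rfl⟩ | ⟨h, rfl⟩)
    exacts [⟨_, h, rfl⟩, ⟨_, h, rfl⟩, ⟨_, h, rfl⟩, ⟨_, h, rfl⟩, ⟨_, h, rfl⟩, ⟨_, h, rfl⟩, ⟨_, h, rfl⟩]

set_option maxHeartbeats 1000000 in
lemma aStates_fold_mem (s : String) (em : PySem.Set String) (x : String) :
    x ∈ aStates.items.foldl
      (fun em kv => if PySem.Str.isIn kv.1 s then PySem.Set.add em kv.2 else em) em ↔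
    x ∈ em ∨ StatesD s x := by
  simp only [show aStates.items = [("bl", "[blushing]"), ("bs", "[blushing]"),
      ("bf", "[intense blushing]"), ("ts", "[crying]"), ("td", "[dried tears]"),
      ("tp", "[holding back tears]"), ("tu", "[crying]")] from rfl,
    List.foldl_cons, List.foldl_nil]
  simp only [mem_addIfP, PySem.Str.isIn_iff_infix,
    show ("bl" : String).toList = ['b', 'l'] from rfl,
    show ("bs" : String).toList = ['b', 's'] from rfl,
    show ("bf" : String).toList = ['b', 'f'] from rfl,
    show ("ts" : String).toList = ['t', 's'] from rfl,
    show ("td" : String).toList = ['t', 'd'] from rfl,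
    show ("tp" : String).toList = ['t', 'p'] from rfl,
    show ("tu" : String).toList = ['t', 'u'] from rfl,
    ← pair_mem_zip_iff_infix]
  unfold StatesD
  tauto

lemma aStates_fold_nodup (s : String) (em : PySem.Set String) (h : em.Nodup) :
    (aStates.items.foldl
      (fun em kv => if PySem.Str.isIn kv.1 s then PySem.Set.add em kv.2 else em) em).Nodup := by
  simp only [show aStates.items = [("bl", "[blushing]"), ("bs", "[blushing]"),
      ("bf", "[intense blushing]"), ("ts", "[crying]"), ("td", "[dried tears]"),
      ("tp", "[holding back tears]"), ("tu", "[crying]")] from rfl,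
    List.foldl_cons, List.foldl_nil]
  repeat' apply nodup_addIf
  exact h

set_option maxHeartbeats 1000000 in
lemma get_emotion_eq (s : String) : get_emotion s = get_emotion_alt s := by
  by_cases h : s.toList = []
  · simp [get_emotion, get_emotion_alt, h]
  · simp only [get_emotion, get_emotion_alt, if_neg h]
    refine congrArg _ ((PySem.List.sorted_id_eq_sorted_id_iff_perm _ _).mpr
      ((List.perm_ext_iff_of_nodup ?_ (PySem.Set.nodup_ofList _)).mpr ?_))
    · apply nodup_addIfSome
      apply aStates_fold_nodup
      apply nodup_addIfSome
      apply nodup_addIfSome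
      exact List.nodup_nil
    · intro x
      by_cases hlen : 1 < s.toList.length
      · simp only [mem_addIfSome, aStates_fold_mem, PySem.Set.mem_ofList, List.mem_filterMap,
          id_eq, exists_eq_right, if_pos hlen, List.mem_append, List.mem_cons,
          List.not_mem_nil, List.mem_map, states_equiv, PySem.Set.empty]
        simp only [eq_comm (b := some x)]
        tauto
      · have h1 : (PySem.Str.pyGet? s 1).bind (PySem.Dict.get? browsT) = none := by
          rw [show (1 : Int) = ((1 : Nat) : Int) from rfl, PySem.Str.pyGet?_natCast,
            List.getElem?_eq_none (by omega)]
          rfl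
        simp only [mem_addIfSome, aStates_fold_mem, PySem.Set.mem_ofList, List.mem_filterMap,
          id_eq, exists_eq_right, if_neg hlen, List.mem_append, List.mem_cons,
          List.not_mem_nil, List.mem_map, states_equiv, PySem.Set.empty, h1]
        simp only [eq_comm (b := some x)]
        try simp only [reduceCtorEq]
        tauto

-- ===== VERDICT (by name: the statement is the Claim_ definition above) =====
theorem get_emotion_spec : Claim_equal_get_emotion := by
  intro sprite_code _
  unfold Spec_get_emotion
  exact get_emotion_eq sprite_code
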